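-- pv_equiv track=rewrite | github.com/EvanSabre/BombermanGameEngine | bonus/MapGenerator.py | create_base_map
-- ===== SOURCE A (Python) =====
-- BRICK = 3
--
-- BLOCK = 2
--
-- BORDER = 1
--
-- def getHboreder(size):
--     line = [BORDER for x in range(size + 2)]
--     return line
--
-- def create_base_map(size):
--     map = []
--     map.append(getHboreder(size))
--     for y in range(1, size + 1):
--         buf_line = []
--         for x in range(size + 2):
--             if x == 0:
--                 buf_line.append(BORDER)
--                 continue
--             elif x== (size + 1):
--                 buf_line.append(BORDER)
--                 continue
--             if y % 2 == 1:
--                 buf_line.append(BLOCK)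
--             else:
--                 if x % 2 == 1:
--                     buf_line.append(BLOCK)
--                 else:
--                     buf_line.append(BRICK)
--         map.append(buf_line)
--     map.append(getHboreder(size))
--     return map
-- ===== SOURCE B (Python) =====
-- BRICK = 3
--
-- BLOCK = 2
--
-- BORDER = 1
--
-- def create_base_map(size):
--     # Tile-and-slice construction: build the three row archetypes once by list
--     # repetition (no per-cell conditionals), then assemble the body as the
--     # 2-periodic tiling [odd_row, even_row] repeated and cut to length.
--     border = [BORDER] * (size + 2)
--     odd_row = [BORDER] + [BLOCK] * size + [BORDER]
--     even_row = [BORDER] + ([BLOCK, BRICK] * ((size + 1) // 2))[:size] + [BORDER]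
--     body = ([odd_row, even_row] * ((size + 1) // 2))[:size]
--     return [border] + [row[:] for row in body] + [border]
-- ===== Notes on version B (the rewrite author's own statement) =====
-- stated objective: faster
-- what changed: Replaces A's nested per-cell loop with per-cell border/parity branching by a tile-and-slice construction: the three row archetypes are built once by list repetition (no per-cell conditionals), the even row's middle and the whole body are produced by repeating a period-2 pattern with list multiplication and cutting it to length with a slice, and rows are copied fresh when assembling.
import Mathlib
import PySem

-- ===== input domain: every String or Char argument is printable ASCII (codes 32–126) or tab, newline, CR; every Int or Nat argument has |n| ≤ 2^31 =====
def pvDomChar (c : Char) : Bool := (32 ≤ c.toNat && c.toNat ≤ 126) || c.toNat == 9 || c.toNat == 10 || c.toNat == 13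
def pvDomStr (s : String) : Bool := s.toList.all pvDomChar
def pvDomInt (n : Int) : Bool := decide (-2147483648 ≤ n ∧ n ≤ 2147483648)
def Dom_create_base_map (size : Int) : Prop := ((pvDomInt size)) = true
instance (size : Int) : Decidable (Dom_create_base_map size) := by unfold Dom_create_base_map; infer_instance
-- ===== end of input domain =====

-- B builds the map by tiling: row archetypes made once by list repetition, the body a period-2
-- pattern repeated by list multiplication and sliced to length; A loops over every cell. Objective: faster
-- (constant factor: bulk list repetition/slicing instead of per-cell work; measured faster in a timing run).

-- ===== PORT A =====
def getHboreder (size : Int) : List Int :=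
  (PySem.List.pyRange 0 (size + 2) 1).map (fun _ => 1)

def create_base_map (size : Int) : List (List Int) :=
  ((PySem.List.pyRange 1 (size + 1) 1).foldl (fun m y =>
      m ++ [(PySem.List.pyRange 0 (size + 2) 1).foldl (fun b x =>
        if x == 0 then b ++ [1]
        else if x == size + 1 then b ++ [1]
        else if PySem.Int.mod y 2 == 1 then b ++ [2]
        else if PySem.Int.mod x 2 == 1 then b ++ [2]
        else b ++ [3]) []]) ([] ++ [getHboreder size])) ++ [getHboreder size]

-- ===== PORT B =====
-- Python `lst * n` (n ≤ 0 gives []): exact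
def pyListMul {α : Type} (l : List α) (n : Int) : List α :=
  (List.replicate n.toNat l).flatten

def cbm_border (size : Int) : List Int := List.replicate (size + 2).toNat 1

def cbm_odd (size : Int) : List Int := [1] ++ List.replicate size.toNat 2 ++ [1]

def cbm_even (size : Int) : List Int :=
  [1] ++ PySem.List.slice (pyListMul [2, 3] (PySem.Int.floordiv (size + 1) 2)) none (some size) ++ [1]

def create_base_map_alt (size : Int) : List (List Int) :=
  [cbm_border size] ++
    ((PySem.List.slice (pyListMul [cbm_odd size, cbm_even size] (PySem.Int.floordiv (size + 1) 2))
        none (some size)).map (fun row => PySem.List.slice row none none)) ++  -- row[:] copy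
  [cbm_border size]

-- ===== PRECONDITION & SPEC =====
def Spec_create_base_map (size : Int) (out : List (List Int)) : Prop := out = create_base_map_alt size
instance (size : Int) (out : List (List Int)) : Decidable (Spec_create_base_map size out) := by unfold Spec_create_base_map; infer_instance

-- ===== CLAIM (what is proved, stated in full; the proofs are below) =====
def Claim_equal_create_base_map : Prop := ∀ (size : Int), Dom_create_base_map size → Spec_create_base_map size (create_base_map size)

-- ===== LEMMAS AND PROOFS =====

-- the border row: A's comprehension over range(size+2) equals B's list repetition
theorem cbm_border_eq (size : Int) : getHboreder size = cbm_border size := by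
  simp [getHboreder, cbm_border, List.map_const']

-- A's per-cell step function, factored as an appended singleton
def cbm_step (size y : Int) (x : Int) : List Int :=
  if x == 0 then [1]
  else if x == size + 1 then [1]
  else if PySem.Int.mod y 2 == 1 then [2]
  else if PySem.Int.mod x 2 == 1 then [2]
  else [3]

-- A's inner row, as a map over the inner range
def cbm_inner (size y : Int) : List Int :=
  [1] ++ (PySem.List.pyRange 1 (size + 1) 1).map
    (fun x => if PySem.Int.mod y 2 == 1 then 2 else if PySem.Int.mod x 2 == 1 then 2 else 3) ++ [1]

theorem cbm_flatMap_mid (size y : Int) :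
    ∀ l : List Int, (∀ x ∈ l, 1 ≤ x ∧ x < size + 1) →
      l.flatMap (cbm_step size y) =
        l.map (fun x => if PySem.Int.mod y 2 == 1 then 2
                        else if PySem.Int.mod x 2 == 1 then 2 else 3) := by
  intro l
  induction l with
  | nil => intro _; rfl
  | cons a t ih =>
    intro h
    have ha := h a (List.mem_cons_self)
    have h0 : (a == 0) = false := by simp; omega
    have h1 : (a == size + 1) = false := by simp; omega
    have hstep : cbm_step size y a =
        [if PySem.Int.mod y 2 == 1 then 2 else if PySem.Int.mod a 2 == 1 then 2 else 3] := by
      simp only [cbm_step, h0, h1, Bool.false_eq_true, if_false]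
      split_ifs <;> rfl
    rw [List.flatMap_cons, List.map_cons, hstep,
      ih (fun x hx => h x (List.mem_cons_of_mem _ hx))]
    rfl

-- an inner row of A's foldl equals cbm_inner
theorem cbm_inner_eq (size y : Int) (hy : 1 ≤ y) (hy' : y < size + 1) :
    (PySem.List.pyRange 0 (size + 2) 1).foldl (fun b x =>
        if x == 0 then b ++ [1]
        else if x == size + 1 then b ++ [1]
        else if PySem.Int.mod y 2 == 1 then b ++ [2]
        else if PySem.Int.mod x 2 == 1 then b ++ [2]
        else b ++ [3]) [] = cbm_inner size y := by
  have hfun : (fun (b : List Int) x =>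
        if x == 0 then b ++ [1]
        else if x == size + 1 then b ++ [1]
        else if PySem.Int.mod y 2 == 1 then b ++ [2]
        else if PySem.Int.mod x 2 == 1 then b ++ [2]
        else b ++ [3]) = fun b x => b ++ cbm_step size y x := by
    funext b x; simp only [cbm_step]; split_ifs <;> rfl
  rw [hfun, PySem.List.foldl_append_eq_flatMap]
  have hsplit : PySem.List.pyRange 0 (size + 2) 1 =
      0 :: (PySem.List.pyRange 1 (size + 1) 1 ++ [size + 1]) := by
    rw [PySem.List.pyRange_one_cons (by omega : (0:Int) < size + 2),
        show (0:Int) + 1 = 1 from rfl,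
        show size + 2 = (size + 1) + 1 by ring,
        PySem.List.pyRange_one_succ_right (by omega)]
  rw [hsplit]
  have hmid := cbm_flatMap_mid size y (PySem.List.pyRange 1 (size + 1) 1)
    (fun x hx => by
      have := (PySem.List.mem_pyRange_one).mp hx; exact ⟨this.1, this.2⟩)
  have h0 : cbm_step size y 0 = [1] := by simp [cbm_step]
  have h1 : cbm_step size y (size + 1) = [1] := by
    simp only [cbm_step]
    rw [if_neg (by simp; omega), if_pos (by simp)]
  simp only [List.nil_append, List.flatMap_cons, List.flatMap_append,
    List.flatMap_nil, List.append_nil, h0, h1, hmid, cbm_inner]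
  rw [List.append_assoc]

-- length of the flattened pair tiling
theorem flat_pair_len {α : Type} (o e : α) (k : Nat) :
    (List.flatten (List.replicate k [o, e])).length = 2 * k := by
  induction k with
  | zero => rfl
  | succ k ih =>
    simp only [List.replicate_succ, List.flatten_cons, List.length_append, ih,
      List.length_cons, List.length_nil]
    omega

-- element j of the pair tiling alternates with the parity of j
theorem flat_pair_getElem {α : Type} (o e : α) :
    ∀ (k j : Nat) (hj : j < (List.flatten (List.replicate k [o, e])).length),
      (List.flatten (List.replicate k [o, e]))[j] = if j % 2 = 0 then o else e := by
  intro k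
  induction k with
  | zero => intro j hj; simp at hj
  | succ k ih =>
    intro j hj
    match j with
    | 0 => simp [List.replicate_succ]
    | 1 => simp [List.replicate_succ]
    | Nat.succ (Nat.succ j') =>
      have hj' : j' < (List.flatten (List.replicate k [o, e])).length := by
        rw [flat_pair_len] at hj ⊢; omega
      have : (j' + 2) % 2 = j' % 2 := by omega
      simp only [List.replicate_succ, List.flatten_cons]
      simpa [this] using ih j' hj'

-- the pair tiling cut to length n is the parity comprehension
theorem take_flat_pair {α : Type} (o e : α) (k n : Nat) (h : n ≤ 2 * k) :
    List.take n (List.flatten (List.replicate k [o, e])) =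
      (List.range n).map (fun i => if i % 2 = 0 then o else e) := by
  apply List.ext_getElem
  · simp only [List.length_take, flat_pair_len, List.length_map, List.length_range]; omega
  · intro i h1 h2
    rw [List.getElem_take, flat_pair_getElem, List.getElem_map, List.getElem_range]


-- parity of 1 + i (Int vs Nat)
theorem mod_one_add (i : Nat) :
    (PySem.Int.mod (1 + (i : Int)) 2 == 1) = decide (i % 2 = 0) := by
  rw [PySem.Int.mod_eq_emod_of_pos (by omega)]
  by_cases h : i % 2 = 0
  · have : (1 + (i : Int)) % 2 = 1 := by omega
    simp [this, h]
  · have : (1 + (i : Int)) % 2 = 0 := by omega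
    simp [this, h]

-- A's parity comprehension over range(1, size+1) equals the sliced [2,3] tiling
theorem cbm_even_mid_eq (size : Int) (hs : 0 ≤ size) :
    (PySem.List.pyRange 1 (size + 1) 1).map
        (fun x => if PySem.Int.mod x 2 == 1 then (2:Int) else 3) =
      PySem.List.slice (pyListMul [2, 3] (PySem.Int.floordiv (size + 1) 2)) none (some size) := by
  rw [PySem.List.slice_to _ hs, pyListMul, PySem.Int.floordiv_eq_ediv_of_pos (by omega),
    take_flat_pair _ _ _ _ (by omega), PySem.List.pyRange_one, List.map_map,
    show size + 1 - 1 = size from by ring]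
  refine List.map_congr_left (fun i _ => ?_)
  simp only [Function.comp, mod_one_add]
  by_cases h : i % 2 = 0 <;> simp [h]

-- cbm_inner is the parity-selected archetype row
theorem cbm_inner_archetype (size y : Int) (hs : 0 ≤ size) :
    cbm_inner size y =
      if PySem.Int.mod y 2 == 1 then cbm_odd size else cbm_even size := by
  unfold cbm_inner cbm_odd cbm_even
  by_cases hy : PySem.Int.mod y 2 == 1
  · simp only [hy, if_true]
    rw [List.map_const', PySem.List.length_pyRange_one,
      show ((size + 1 : Int) - 1).toNat = size.toNat by omega]
  · simp only [hy, if_false, Bool.false_eq_true]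
    rw [cbm_even_mid_eq size hs]

-- A's body (rows 1..size) equals B's sliced [odd,even] tiling
theorem cbm_body_eq (size : Int) :
    (PySem.List.pyRange 1 (size + 1) 1).map (cbm_inner size) =
      PySem.List.slice (pyListMul [cbm_odd size, cbm_even size] (PySem.Int.floordiv (size + 1) 2))
        none (some size) := by
  by_cases hs : 0 ≤ size
  · rw [PySem.List.slice_to _ hs, pyListMul, PySem.Int.floordiv_eq_ediv_of_pos (by omega),
      take_flat_pair _ _ _ _ (by omega), PySem.List.pyRange_one, List.map_map,
      show size + 1 - 1 = size from by ring]
    refine List.map_congr_left (fun i _ => ?_)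
    simp only [Function.comp]
    rw [cbm_inner_archetype size _ hs, mod_one_add]
    by_cases h : i % 2 = 0 <;> simp [h]
  · rw [PySem.List.pyRange_one_eq_nil (by omega), pyListMul,
      show (PySem.Int.floordiv (size + 1) 2).toNat = 0 by
        have := PySem.Int.floordiv_eq_ediv_of_pos (a := size + 1) (b := 2) (by omega)
        omega]
    simp [PySem.List.slice]

-- ===== VERDICT (by name: the statement is the Claim_ definition above) =====
theorem create_base_map_spec : Claim_equal_create_base_map := by
  intro size _
  show create_base_map size = create_base_map_alt size
  unfold create_base_map create_base_map_alt
  have h1 := PySem.List.foldl_congr_mem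
    (l := PySem.List.pyRange 1 (size + 1) 1)
    (init := ([] ++ [getHboreder size] : List (List Int)))
    (f := fun m y => m ++ [(PySem.List.pyRange 0 (size + 2) 1).foldl (fun b x =>
        if x == 0 then b ++ [1]
        else if x == size + 1 then b ++ [1]
        else if PySem.Int.mod y 2 == 1 then b ++ [2]
        else if PySem.Int.mod x 2 == 1 then b ++ [2]
        else b ++ [3]) []])
    (g := fun m y => m ++ [cbm_inner size y])
    (by
      intro acc y hy
      have := (PySem.List.mem_pyRange_one).mp hy
      simp only [cbm_inner_eq size y this.1 this.2])
  rw [h1, PySem.List.foldl_append_singleton_eq_map, cbm_border_eq, cbm_body_eq]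
  simp [PySem.List.slice_none_none]
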